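-- pv_equiv track=rewrite | github.com/pypi-data/pypi-mirror-318 | packages/dgNova/dgNova-1.0.0-py3-none-any.whl/dgNova/designs/layouts.py | validate_layout
-- ===== SOURCE A (Python) =====
-- from typing import List, Tuple, Optional
--
-- def validate_layout(layout: List[List[List[int]]], k: int) -> bool:
--     """
--     Validate a lattice design layout
--
--     Parameters
--     ----------
--     layout : List[List[List[int]]]
--         Layout to validate
--     k : int
--         Block size
--
--     Returns
--     -------
--     bool
--         True if layout is valid
--     """
--     treatments = k * k
--
--     # Check each replication
--     for rep in layout:
--         # Check number of blocks
--         if len(rep) != k: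
--             return False
--
--         # Check block sizes
--         if not all(len(block) == k for block in rep):
--             return False
--
--         # Check each treatment appears once
--         treatments_in_rep = [t for block in rep for t in block]
--         if len(set(treatments_in_rep)) != treatments:
--             return False
--
--         # Check treatment numbers are valid
--         if not all(0 <= t < treatments for t in treatments_in_rep):
--             return False
--
--     return True
-- ===== SOURCE B (Python) =====
-- from typing import List
--
--
-- def validate_layout(layout: List[List[List[int]]], k: int) -> bool:
--     treatments = k * k
--     for rep in layout:
--         if len(rep) != k:
--             return False
--         seen = [False] * treatments
--         for block in rep:
--             if len(block) != k:
--                 return False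
--             for t in block:
--                 if not (0 <= t < treatments):
--                     return False
--                 if seen[t]:
--                     return False
--                 seen[t] = True
--     return True
-- ===== Notes on version B (the rewrite author's own statement) =====
-- stated objective: alternative
-- what changed: Replaces A's build-flat-list + set-cardinality check + separate range scan with a single early-exiting marking pass over a boolean array, with the block-length check interleaved per block.
import Mathlib
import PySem

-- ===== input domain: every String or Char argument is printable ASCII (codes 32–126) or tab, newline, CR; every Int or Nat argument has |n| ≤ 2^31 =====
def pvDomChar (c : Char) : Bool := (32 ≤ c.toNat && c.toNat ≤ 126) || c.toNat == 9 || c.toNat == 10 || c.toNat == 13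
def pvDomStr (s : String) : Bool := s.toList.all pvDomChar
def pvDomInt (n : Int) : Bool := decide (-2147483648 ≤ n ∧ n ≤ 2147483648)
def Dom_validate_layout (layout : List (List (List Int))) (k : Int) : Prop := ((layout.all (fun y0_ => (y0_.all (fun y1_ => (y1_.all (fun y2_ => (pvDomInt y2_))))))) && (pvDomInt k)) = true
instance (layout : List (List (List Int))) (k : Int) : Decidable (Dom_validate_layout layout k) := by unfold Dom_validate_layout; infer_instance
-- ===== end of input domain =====

-- B validates each rep with one early-exiting marking pass over a boolean array instead of
-- A's set-cardinality check plus separate range scan; same values, similar cost (alternative).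

-- ===== PORT A =====
-- loop over the replications, transliterating A's sequence of checks per rep
def pvLoopA (treatments k : Int) : List (List (List Int)) → Bool
  | [] => true
  | rep :: rest =>
    if ((rep.length : Int) ≠ k) then false
    else if ¬ (rep.all fun block => ((block.length : Int) == k)) then false
    else
      let tir := rep.flatMap (fun block => block)
      if (((PySem.Set.ofList tir).length : Int) ≠ treatments) then false
      else if ¬ (tir.all fun t => decide (0 ≤ t) && decide (t < treatments)) then false
      else pvLoopA treatments k rest

def validate_layout (layout : List (List (List Int))) (k : Int) : Bool :=
  pvLoopA (k * k) k layout

-- ===== PORT B =====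
-- inner loop 'for t in block': none models B's early 'return False'
def pvScanBlockB (treatments : Int) (seen : List Bool) : List Int → Option (List Bool)
  | [] => some seen
  | t :: ts =>
    if ¬ (0 ≤ t ∧ t < treatments) then none
    else if PySem.List.pyGetD seen t false then none
    else pvScanBlockB treatments (PySem.List.pySetD seen t true) ts

-- middle loop 'for block in rep'
def pvScanRepB (treatments k : Int) (seen : List Bool) : List (List Int) → Bool
  | [] => true
  | block :: blocks =>
    if ((block.length : Int) ≠ k) then false
    else match pvScanBlockB treatments seen block with
      | none => false
      | some seen' => pvScanRepB treatments k seen' blocks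

-- outer loop 'for rep in layout', allocating 'seen = [False] * treatments' per rep
def pvLoopB (treatments k : Int) : List (List (List Int)) → Bool
  | [] => true
  | rep :: rest =>
    if ((rep.length : Int) ≠ k) then false
    else if pvScanRepB treatments k (List.replicate treatments.toNat false) rep then
      pvLoopB treatments k rest
    else false

def validate_layout_alt (layout : List (List (List Int))) (k : Int) : Bool :=
  pvLoopB (k * k) k layout

-- ===== PRECONDITION & SPEC =====
def Spec_validate_layout (layout : List (List (List Int))) (k : Int) (out : Bool) : Prop := out = validate_layout_alt layout k
instance (layout : List (List (List Int))) (k : Int) (out : Bool) : Decidable (Spec_validate_layout layout k out) := by unfold Spec_validate_layout; infer_instance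

-- ===== CLAIM (what is proved, stated in full; the proofs are below) =====
def Claim_equal_validate_layout : Prop := ∀ (layout : List (List (List Int))) (k : Int), Dom_validate_layout layout k → Spec_validate_layout layout k (validate_layout layout k)

-- ===== LEMMAS AND PROOFS =====

-- what B's marking pass accepts: each element in range and not yet marked
def pvGood (tr : Int) (S : List Int) : List Int → Prop
  | [] => True
  | t :: ts => (0 ≤ t ∧ t < tr) ∧ t ∉ S ∧ pvGood tr (t :: S) ts

-- 'seen' is a boolean array of length tr marking exactly the members of S
def pvRep (tr : Int) (seen : List Bool) (S : List Int) : Prop :=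
  seen.length = tr.toNat ∧ ∀ t : Int, 0 ≤ t → (PySem.List.pyGetD seen t false = true ↔ t ∈ S)

theorem pvGood_congr (tr : Int) (ts : List Int) : ∀ (S S' : List Int), (∀ x, x ∈ S ↔ x ∈ S') →
    (pvGood tr S ts ↔ pvGood tr S' ts) := by
  induction ts with
  | nil => intro S S' _; simp [pvGood]
  | cons t ts ih =>
    intro S S' h
    simp only [pvGood]
    constructor <;> rintro ⟨h1, h2, h3⟩
    · exact ⟨h1, (h t).not.mp h2, (ih _ _ (by intro x; simp [h x])).mp h3⟩
    · exact ⟨h1, (h t).not.mpr h2, (ih _ _ (by intro x; simp [h x])).mpr h3⟩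

theorem pvGood_append (tr : Int) (xs : List Int) : ∀ (S ys : List Int),
    pvGood tr S (xs ++ ys) ↔ pvGood tr S xs ∧ pvGood tr (xs ++ S) ys := by
  induction xs with
  | nil => intro S ys; simp [pvGood]
  | cons x xs ih =>
    intro S ys
    simp only [List.cons_append, pvGood]
    rw [ih (x :: S) ys,
      pvGood_congr tr ys (xs ++ x :: S) ((x :: xs) ++ S) (by intro y; simp; tauto)]
    tauto

theorem pvGood_iff (tr : Int) (ts : List Int) : ∀ S : List Int,
    pvGood tr S ts ↔ (∀ t ∈ ts, 0 ≤ t ∧ t < tr) ∧ ts.Nodup ∧ ∀ t ∈ ts, t ∉ S := by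
  induction ts with
  | nil => intro S; simp [pvGood]
  | cons t ts ih =>
    intro S
    simp only [pvGood, ih, List.mem_cons, List.nodup_cons]
    constructor
    · rintro ⟨h1, h2, h3, h4, h5⟩
      refine ⟨?_, ⟨?_, h4⟩, ?_⟩
      · rintro u (rfl | hu); exact h1; exact h3 u hu
      · intro hmem; exact (h5 t hmem) (Or.inl rfl)
      · rintro u (rfl | hu) hS
        · exact h2 hS
        · exact h5 u hu (Or.inr hS)
    · rintro ⟨h1, ⟨h2, h3⟩, h4⟩
      refine ⟨h1 t (Or.inl rfl), fun h => h4 t (Or.inl rfl) h,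
        fun u hu => h1 u (Or.inr hu), h3, ?_⟩
      rintro u hu (rfl | hS)
      · exact h2 hu
      · exact h4 u (Or.inr hu) hS

theorem pvRep_init (tr : Int) : pvRep tr (List.replicate tr.toNat false) [] := by
  refine ⟨by simp, fun t ht => ?_⟩
  have hcast : ((t.toNat : Nat) : Int) = t := by omega
  rw [← hcast, PySem.List.pyGetD, PySem.List.pyGet?_natCast, List.getElem?_replicate]
  split <;> simp

theorem pvScanBlockB_some (tr : Int) (ts : List Int) : ∀ (seen : List Bool) (S : List Int),
    pvRep tr seen S → pvGood tr S ts →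
    ∃ seen', pvScanBlockB tr seen ts = some seen' ∧ pvRep tr seen' (ts ++ S) := by
  induction ts with
  | nil => intro seen S hrep _; exact ⟨seen, rfl, by simpa using hrep⟩
  | cons t ts ih =>
    intro seen S hrep hg
    obtain ⟨⟨ht0, httr⟩, htS, hgood⟩ := hg
    obtain ⟨hlen, hmem⟩ := hrep
    have hseen : PySem.List.pyGetD seen t false = false := by
      cases h : PySem.List.pyGetD seen t false
      · rfl
      · exact absurd ((hmem t ht0).mp h) htS
    have htn : t.toNat < seen.length := by
      rw [hlen]; omega
    have htcast : ((t.toNat : Nat) : Int) = t := by omega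
    have hrep' : pvRep tr (PySem.List.pySetD seen t true) (t :: S) := by
      refine ⟨by rw [PySem.List.length_pySetD]; exact hlen, fun u hu => ?_⟩
      have hucast : ((u.toNat : Nat) : Int) = u := by omega
      rw [← htcast, ← hucast, PySem.List.pyGetD_pySetD_natCast seen t.toNat u.toNat true false htn]
      by_cases h : u.toNat = t.toNat
      · have : u = t := by omega
        simp [this]
      · have hne : u ≠ t := by omega
        rw [if_neg h, hucast]
        simp only [hmem u hu, List.mem_cons, htcast]
        tauto
    obtain ⟨seen', hrun, hrep''⟩ := ih _ _ hrep' hgood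
    refine ⟨seen', ?_, ?_⟩
    · simp only [pvScanBlockB, hseen]
      rw [if_neg (not_not_intro ⟨ht0, httr⟩), if_neg (by simp)]
      exact hrun
    · exact ⟨hrep''.1, fun u hu => by rw [hrep''.2 u hu]; simp; tauto⟩

theorem pvScanBlockB_none (tr : Int) (ts : List Int) : ∀ (seen : List Bool) (S : List Int),
    pvRep tr seen S → ¬ pvGood tr S ts → pvScanBlockB tr seen ts = none := by
  induction ts with
  | nil => intro seen S _ hg; exact absurd trivial hg
  | cons t ts ih =>
    intro seen S hrep hg
    simp only [pvScanBlockB]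
    by_cases hr : 0 ≤ t ∧ t < tr
    · rw [if_neg (not_not_intro hr)]
      by_cases hs : PySem.List.pyGetD seen t false = true
      · rw [if_pos hs]
      · rw [if_neg hs]
        have htS : t ∉ S := fun h => hs ((hrep.2 t hr.1).mpr h)
        have hg' : ¬ pvGood tr (t :: S) ts := fun h => hg ⟨hr, htS, h⟩
        have htn : t.toNat < seen.length := by rw [hrep.1]; omega
        have htcast : ((t.toNat : Nat) : Int) = t := by omega
        refine ih _ _ ⟨by rw [PySem.List.length_pySetD]; exact hrep.1, fun u hu => ?_⟩ hg'
        have hucast : ((u.toNat : Nat) : Int) = u := by omega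
        rw [← htcast, ← hucast, PySem.List.pyGetD_pySetD_natCast seen t.toNat u.toNat true false htn]
        by_cases h : u.toNat = t.toNat
        · have : u = t := by omega
          simp [this]
        · have hne : u ≠ t := by omega
          rw [if_neg h, hucast]
          simp only [hrep.2 u hu, List.mem_cons, htcast]
          tauto
    · rw [if_pos hr]

theorem pvScanRepB_iff (tr k : Int) (blocks : List (List Int)) : ∀ (seen : List Bool) (S : List Int),
    pvRep tr seen S →
    (pvScanRepB tr k seen blocks = true ↔
      (∀ b ∈ blocks, (b.length : Int) = k) ∧ pvGood tr S (blocks.flatMap (fun b => b))) := by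
  induction blocks with
  | nil => intro seen S _; simp [pvScanRepB, pvGood]
  | cons b bs ih =>
    intro seen S hrep
    simp only [pvScanRepB, List.flatMap_cons, pvGood_append, List.mem_cons]
    by_cases hb : ((b.length : Int) = k)
    · rw [if_neg (by simpa using hb)]
      by_cases hg : pvGood tr S b
      · obtain ⟨seen', hrun, hrep'⟩ := pvScanBlockB_some tr b seen S hrep hg
        rw [hrun, ih seen' (b ++ S) hrep']
        constructor
        · rintro ⟨h1, h2⟩
          exact ⟨by rintro c (rfl | hc); exact hb; exact h1 c hc, hg, h2⟩
        · rintro ⟨h1, _, h2⟩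
          exact ⟨fun c hc => h1 c (Or.inr hc), h2⟩
      · rw [pvScanBlockB_none tr b seen S hrep hg]
        simp; tauto
    · rw [if_pos (by simpa using hb)]
      constructor
      · intro h; simp at h
      · rintro ⟨h1, _⟩; exact absurd (h1 b (Or.inl rfl)) hb

theorem pvOfList_length_iff (l : List Int) :
    (PySem.Set.ofList l).length = l.length ↔ l.Nodup := by
  constructor
  · intro h
    have hperm : (PySem.Set.ofList l).Perm l.dedup := by
      rw [List.perm_ext_iff_of_nodup (PySem.Set.nodup_ofList l) l.nodup_dedup]
      intro x
      simp [PySem.Set.mem_ofList, List.mem_dedup]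
    have hlen : l.dedup.length = l.length := by
      rw [← hperm.length_eq, h]
    have : l.dedup = l := (List.dedup_sublist l).eq_of_length hlen
    rw [← this]
    exact l.nodup_dedup
  · intro h
    rw [PySem.Set.ofList_eq_self_of_nodup l h]

theorem pvFlat_length (k : Int) (rep : List (List Int)) (hall : ∀ b ∈ rep, (b.length : Int) = k) :
    ((rep.flatMap (fun b => b)).length : Int) = (rep.length : Int) * k := by
  induction rep with
  | nil => simp
  | cons b bs ih =>
    simp only [List.flatMap_cons, List.length_append, List.length_cons]
    have hb := hall b (List.mem_cons_self ..)
    have hbs := ih (fun c hc => hall c (List.mem_cons_of_mem _ hc))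
    push_cast
    push_cast at hbs
    rw [hb, hbs]
    ring

theorem pvLoops_eq (k : Int) (layout : List (List (List Int))) :
    pvLoopA (k * k) k layout = pvLoopB (k * k) k layout := by
  induction layout with
  | nil => rfl
  | cons rep rest ih =>
    simp only [pvLoopA, pvLoopB]
    by_cases hlen : ((rep.length : Int) ≠ k)
    · rw [if_pos hlen, if_pos hlen]
    · rw [if_neg hlen, if_neg hlen]
      rw [not_not] at hlen
      have hk0 : 0 ≤ k := by omega
      have hB := pvScanRepB_iff (k * k) k rep (List.replicate (k * k).toNat false) []
        (pvRep_init (k * k))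
      have hGoodIff := pvGood_iff (k * k) (rep.flatMap (fun b => b)) []
      by_cases hblocks : (∀ b ∈ rep, (b.length : Int) = k)
      · rw [if_neg (by
          simp only [not_not, List.all_eq_true]
          intro b hb
          simpa using hblocks b hb)]
        have hflat : ((rep.flatMap (fun b => b)).length : Int) = k * k := by
          rw [pvFlat_length k rep hblocks, hlen]
        by_cases hnodup : (rep.flatMap (fun b => b)).Nodup
        · rw [if_neg (by
            simp only [not_not]
            rw [show ((PySem.Set.ofList (rep.flatMap fun b => b)).length : Int)
                = ((rep.flatMap fun b => b).length : Int) by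
              exact congrArg (fun n : Nat => (n : Int)) ((pvOfList_length_iff _).mpr hnodup)]
            exact hflat)]
          by_cases hrange : (∀ t ∈ rep.flatMap (fun b => b), 0 ≤ t ∧ t < k * k)
          · rw [if_neg (by
              simp only [not_not, List.all_eq_true]
              intro t ht
              obtain ⟨h1, h2⟩ := hrange t ht
              simp [h1, h2])]
            rw [if_pos (hB.mpr ⟨hblocks, (hGoodIff.mpr ⟨hrange, hnodup, by simp⟩)⟩)]
            exact ih
          · rw [if_pos (by
              intro hAll
              apply hrange
              intro t ht
              simpa using List.all_eq_true.mp hAll t ht)]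
            rw [if_neg (by
              intro hEq
              exact hrange ((hGoodIff.mp (hB.mp hEq).2).1))]
        · have hBfalse : pvScanRepB (k * k) k (List.replicate (k * k).toNat false) rep ≠ true := by
            intro hEq
            exact hnodup (hGoodIff.mp (hB.mp hEq).2).2.1
          rw [if_neg hBfalse, if_pos (by
            intro hEq
            apply hnodup
            rw [← pvOfList_length_iff]
            omega)]
      · have hBfalse : pvScanRepB (k * k) k (List.replicate (k * k).toNat false) rep ≠ true := by
          intro hEq
          exact hblocks (hB.mp hEq).1
        rw [if_neg hBfalse, if_pos (by
          intro hAll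
          apply hblocks
          intro b hb
          simpa using List.all_eq_true.mp hAll b hb)]

-- ===== VERDICT (by name: the statement is the Claim_ definition above) =====
theorem validate_layout_spec : Claim_equal_validate_layout := by
  intro layout k _
  unfold Spec_validate_layout validate_layout validate_layout_alt
  exact pvLoops_eq k layout
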